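-- pv_equiv track=rewrite | github.com/notmyfaultok/Random-Research | factorsOfGroup.py | auxCheckT
-- ===== SOURCE A (Python) =====
-- def auxCheckT(a,b,i,x):
--     count=0
--     for m in a:
--         for n in b:
--             if (m+n)%x == i:
--                 count = count +1
--     if count ==1 :
--         return True
--     else:
--         return False
-- ===== SOURCE B (Python) =====
-- def auxCheckT(a, b, i, x):
--     # Residue-counting: O(len(a)+len(b)) instead of A's O(len(a)*len(b)).
--     if not a or not b:
--         return False
--     if i % x != i:
--         return False
--     cb = {}
--     for n in b:
--         r = n % x
--         cb[r] = cb.get(r, 0) + 1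
--     count = 0
--     for m in a:
--         count += cb.get((i - m) % x, 0)
--     return count == 1
-- ===== Notes on version B (the rewrite author's own statement) =====
-- stated objective: faster
-- what changed: Replaces the nested double loop over all pairs by a hash counter of b's residues mod x plus one pass over a (and an early False when i is not a canonical residue), removing the inner scan.
import Mathlib
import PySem

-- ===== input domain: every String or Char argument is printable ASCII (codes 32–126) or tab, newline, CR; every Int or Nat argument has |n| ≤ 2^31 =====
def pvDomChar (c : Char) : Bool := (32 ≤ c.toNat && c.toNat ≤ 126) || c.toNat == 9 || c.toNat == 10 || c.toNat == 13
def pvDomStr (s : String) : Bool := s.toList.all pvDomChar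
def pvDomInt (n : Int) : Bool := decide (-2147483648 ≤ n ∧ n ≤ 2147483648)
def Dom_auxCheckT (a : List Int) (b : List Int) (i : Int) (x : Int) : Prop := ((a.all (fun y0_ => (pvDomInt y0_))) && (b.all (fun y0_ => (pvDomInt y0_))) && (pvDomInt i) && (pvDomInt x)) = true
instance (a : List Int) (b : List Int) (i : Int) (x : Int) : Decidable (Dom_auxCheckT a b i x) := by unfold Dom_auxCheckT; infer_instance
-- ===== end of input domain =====

-- B replaces A's nested pair loop by a residue counter of b mod x plus one pass over a (asymptotically faster).


-- ===== PORT A =====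
def auxCheckT (a : List Int) (b : List Int) (i : Int) (x : Int) : Bool :=
  let count : Int :=
    a.foldl (fun c m =>
      b.foldl (fun c n => if PySem.Int.mod (m + n) x == i then c + 1 else c) c) 0
  if count == 1 then true else false

-- ===== PORT B =====
def auxCheckT_alt (a : List Int) (b : List Int) (i : Int) (x : Int) : Bool :=
  if a = [] ∨ b = [] then false
  else if PySem.Int.mod i x ≠ i then false
  else
    let cb : PySem.Dict Int Int :=
      b.foldl (fun d n => d.insert (PySem.Int.mod n x) (d.getD (PySem.Int.mod n x) 0 + 1))
        PySem.Dict.empty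
    let count : Int := a.foldl (fun c m => c + cb.getD (PySem.Int.mod (i - m) x) 0) 0
    count == 1

-- ===== PRECONDITION & SPEC =====
-- Pre_ excludes exactly the inputs where Python A raises ZeroDivisionError: x = 0 with both lists nonempty.
def Pre_auxCheckT (a : List Int) (b : List Int) (i : Int) (x : Int) : Prop :=
  x ≠ 0 ∨ a = [] ∨ b = []
instance (a : List Int) (b : List Int) (i : Int) (x : Int) : Decidable (Pre_auxCheckT a b i x) := by
  unfold Pre_auxCheckT; infer_instance
def pvWitness_auxCheckT : List Int × List Int × Int × Int := ([1, 2], [3], 1, 2)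
def Spec_auxCheckT (a : List Int) (b : List Int) (i : Int) (x : Int) (out : Bool) : Prop := out = auxCheckT_alt a b i x
instance (a : List Int) (b : List Int) (i : Int) (x : Int) (out : Bool) : Decidable (Spec_auxCheckT a b i x out) := by unfold Spec_auxCheckT; infer_instance

-- ===== CLAIM (what is proved, stated in full; the proofs are below) =====
def Claim_equal_auxCheckT : Prop := ∀ (a : List Int) (b : List Int) (i : Int) (x : Int), Dom_auxCheckT a b i x → Pre_auxCheckT a b i x → Spec_auxCheckT a b i x (auxCheckT a b i x)

-- ===== LEMMAS AND PROOFS =====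

-- a % x = b % x  ↔  x ∣ (a - b)   (for x ≠ 0; Python floor mod)
theorem pymod_congr_iff (a b x : Int) (hx : x ≠ 0) :
    PySem.Int.mod a x = PySem.Int.mod b x ↔ x ∣ (a - b) := by
  constructor
  · intro h
    have ha := PySem.Int.floordiv_mul_add_mod a x
    have hb := PySem.Int.floordiv_mul_add_mod b x
    refine ⟨PySem.Int.floordiv a x - PySem.Int.floordiv b x, ?_⟩
    have : a - b = PySem.Int.floordiv a x * x - PySem.Int.floordiv b x * x := by omega
    rw [this]; ring
  · rintro ⟨k, hk⟩
    have ha := PySem.Int.floordiv_mul_add_mod a x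
    have hb := PySem.Int.floordiv_mul_add_mod b x
    have hdvd : x ∣ (PySem.Int.mod a x - PySem.Int.mod b x) := by
      refine ⟨k - PySem.Int.floordiv a x + PySem.Int.floordiv b x, ?_⟩
      have : PySem.Int.mod a x - PySem.Int.mod b x
          = (a - b) - PySem.Int.floordiv a x * x + PySem.Int.floordiv b x * x := by omega
      rw [this, hk]; ring
    have hdvd' : |x| ∣ (PySem.Int.mod a x - PySem.Int.mod b x) := (abs_dvd _ _).mpr hdvd
    have hlt : |PySem.Int.mod a x - PySem.Int.mod b x| < |x| := by
      rcases lt_or_gt_of_ne hx with hneg | hpos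
      · have h1 := PySem.Int.mod_neg_bounds a (b := x) hneg
        have h2 := PySem.Int.mod_neg_bounds b (b := x) hneg
        rw [abs_of_nonpos (le_of_lt hneg), abs_sub_lt_iff]
        constructor <;> omega
      · have h1a := PySem.Int.mod_nonneg a (b := x) hpos
        have h1b := PySem.Int.mod_lt a (b := x) hpos
        have h2a := PySem.Int.mod_nonneg b (b := x) hpos
        have h2b := PySem.Int.mod_lt b (b := x) hpos
        rw [abs_of_pos hpos, abs_sub_lt_iff]
        constructor <;> omega
    have := Int.eq_zero_of_abs_lt_dvd hdvd' hlt
    omega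

-- Python mod is idempotent (x ≠ 0)
theorem pymod_idem (t x : Int) (hx : x ≠ 0) :
    PySem.Int.mod (PySem.Int.mod t x) x = PySem.Int.mod t x := by
  apply (pymod_congr_iff _ _ x hx).mpr
  refine ⟨-(PySem.Int.floordiv t x), ?_⟩
  have hfd := PySem.Int.floordiv_mul_add_mod t x
  have h1 : PySem.Int.mod t x - t = -(PySem.Int.floordiv t x * x) := by omega
  rw [h1]; ring

-- inner loop of A adds the number of matching n's
theorem foldl_count_add (b : List Int) (p : Int → Bool) (c : Int) :
    b.foldl (fun c n => if p n then c + 1 else c) c = c + (b.countP p : Int) := by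
  induction b generalizing c with
  | nil => simp
  | cons n t ih =>
    by_cases hp : p n
    · simp [List.foldl, hp, ih]; omega
    · simp [List.foldl, hp, ih]

-- A's double loop as a sum of per-m counts
theorem foldlA_eq (a b : List Int) (i x : Int) (c : Int) :
    a.foldl (fun c m =>
      b.foldl (fun c n => if PySem.Int.mod (m + n) x == i then c + 1 else c) c) c
      = a.foldl (fun c m => c + (b.countP (fun n => PySem.Int.mod (m + n) x == i) : Int)) c := by
  induction a generalizing c with
  | nil => rfl
  | cons m t ih => simp only [List.foldl]; rw [foldl_count_add, ih]

theorem foldl_sum_congr (a : List Int) (f g : Int → Int) (c : Int)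
    (h : ∀ m, f m = g m) :
    a.foldl (fun c m => c + f m) c = a.foldl (fun c m => c + g m) c := by
  induction a generalizing c with
  | nil => rfl
  | cons m t ih => simp [List.foldl, h m, ih]

theorem foldl_sum_zero (a : List Int) (f : Int → Int) (c : Int)
    (h : ∀ m, f m = 0) :
    a.foldl (fun c m => c + f m) c = c := by
  induction a generalizing c with
  | nil => rfl
  | cons m t ih => simp [List.foldl, h m, ih]

theorem auxCheckT_spec' (a b : List Int) (i x : Int) (hx : x ≠ 0) (ha : a ≠ []) (hb : b ≠ []) :
    auxCheckT a b i x = auxCheckT_alt a b i x := by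
  unfold auxCheckT auxCheckT_alt
  simp only [ha, hb, or_self]
  by_cases hi : PySem.Int.mod i x = i
  · -- counts agree termwise
    have hcb : ∀ v, (b.foldl (fun d n =>
          d.insert (PySem.Int.mod n x) (d.getD (PySem.Int.mod n x) 0 + 1))
          (PySem.Dict.empty : PySem.Dict Int Int)).getD v 0
        = ((b.map (fun n => PySem.Int.mod n x)).count v : Int) := by
      intro v
      rw [show (b.foldl (fun d n =>
            d.insert (PySem.Int.mod n x) (d.getD (PySem.Int.mod n x) 0 + 1))
            (PySem.Dict.empty : PySem.Dict Int Int))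
          = ((b.map (fun n => PySem.Int.mod n x)).foldl
              (fun d r => d.insert r (d.getD r 0 + 1)) PySem.Dict.empty) by
        rw [List.foldl_map]]
      rw [PySem.Dict.getD_foldl_insert_add_one]
      norm_num [PySem.Dict.empty, PySem.Dict.getD, PySem.Dict.get?]
    have hterm : ∀ m, (b.countP (fun n => PySem.Int.mod (m + n) x == i) : Int)
        = ((b.map (fun n => PySem.Int.mod n x)).count (PySem.Int.mod (i - m) x) : Int) := by
      intro m
      congr 1
      rw [List.count, List.countP_map]
      apply List.countP_congr
      intro n _
      simp only [Function.comp, beq_iff_eq]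
      constructor
      · intro h
        apply (pymod_congr_iff n (i - m) x hx).mpr
        have hd : x ∣ ((m + n) - i) :=
          (pymod_congr_iff (m + n) i x hx).mp (by rw [h, hi])
        rcases hd with ⟨k, hk⟩
        exact ⟨k, by omega⟩
      · intro h
        have hd := (pymod_congr_iff n (i - m) x hx).mp h
        have hd2 : x ∣ ((m + n) - i) := by rcases hd with ⟨k, hk⟩; exact ⟨k, by omega⟩
        have := (pymod_congr_iff (m + n) i x hx).mpr hd2
        rw [this, hi]
    simp only [hi, ne_eq, not_true_eq_false, if_false]
    simp only [hcb]
    rw [foldlA_eq, foldl_sum_congr _ _ _ _ hterm]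
    split <;> simp_all
  · -- i is not a canonical residue: A's count is 0, B returns false
    simp only [hi, ne_eq, not_false_eq_true, if_true]
    have hzero : ∀ m, (b.countP (fun n => PySem.Int.mod (m + n) x == i) : Int) = 0 := by
      intro m
      norm_num [List.countP_eq_zero]
      intro n _ hc
      apply hi
      have hid := pymod_idem (m + n) x hx
      rw [← hc, hid, hc]
    rw [foldlA_eq, foldl_sum_zero _ _ _ hzero]
    decide

-- ===== VERDICT (by name: the statement is the Claim_ definition above) =====
theorem auxCheckT_spec : Claim_equal_auxCheckT := by
  intro a b i x _ hpre
  unfold Spec_auxCheckT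
  rcases hpre with hx | ha | hb
  · by_cases ha : a = []
    · subst ha; simp [auxCheckT, auxCheckT_alt]
    · by_cases hb : b = []
      · subst hb
        have : ∀ c : Int, a.foldl (fun c _ => c) c = c := fun c => List.foldl_fixed _
        simp [auxCheckT, auxCheckT_alt]
      · exact auxCheckT_spec' a b i x hx ha hb
  · subst ha; simp [auxCheckT, auxCheckT_alt]
  · subst hb
    have hb : ∀ (c : Int) (m : Int),
        ([] : List Int).foldl (fun c n => if PySem.Int.mod (m + n) x == i then c + 1 else c) c = c :=
      fun _ _ => rfl
    have : ∀ c : Int, a.foldl (fun c _ => c) c = c := fun c => List.foldl_fixed _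
    simp [auxCheckT, auxCheckT_alt]
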